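-- pv_equiv track=rewrite | github.com/queelius/computational-explorations | src/set_theory_attacks.py | sunflower_free_family
-- ===== SOURCE A (Python) =====
-- from itertools import combinations, product as iproduct
-- from typing import Dict, FrozenSet, List, Optional, Set, Tuple
--
-- def is_sunflower(family: List[FrozenSet[int]], r: int) -> Optional[List[int]]:
--     """
--     Check if family contains a sunflower with r petals.
--
--     Returns indices of the r sunflower members if found, None otherwise.
--     """
--     if len(family) < r:
--         return None
--
--     for indices in combinations(range(len(family)), r):
--         sets = [family[i] for i in indices]
--         # Compute pairwise intersections
--         kernel = sets[0]
--         for s in sets[1:]: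
--             kernel = kernel & s
--
--         # Check: every pair intersects exactly in the kernel
--         is_sf = True
--         for i in range(len(sets)):
--             for j in range(i + 1, len(sets)):
--                 if sets[i] & sets[j] != kernel:
--                     is_sf = False
--                     break
--             if not is_sf:
--                 break
--
--         if is_sf:
--             return list(indices)
--
--     return None
--
-- def sunflower_free_family(k: int, r: int, universe_size: int) -> List[FrozenSet[int]]:
--     """
--     Greedily build a maximal family of k-element subsets of [universe_size]
--     that avoids containing a sunflower with r petals.
--
--     Returns the maximal sunflower-free family.
--     """
--     universe = list(range(1, universe_size + 1))
--     family: List[FrozenSet[int]] = []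
--
--     for subset in combinations(universe, k):
--         candidate = frozenset(subset)
--         test_family = family + [candidate]
--         if is_sunflower(test_family, r) is None:
--             family.append(candidate)
--
--     return family
-- ===== SOURCE B (Python) =====
-- from itertools import combinations
--
--
-- def _extends_to_sunflower(family, cand, r):
--     # family is already sunflower-free, so any r-sunflower in family + [cand]
--     # must contain cand: only test (r-1)-combinations of the family.
--     for chosen in combinations(family, r - 1):
--         sets = list(chosen) + [cand]
--         # sunflower <=> every element lying in >= 2 of the sets lies in ALL of them
--         if all(all(x in t for t in sets) or
--                not any(x in t for j, t in enumerate(sets) if j != i)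
--                for i, s in enumerate(sets) for x in s):
--             return True
--     return False
--
--
-- def sunflower_free_family(k, r, universe_size):
--     family = []
--     for subset in combinations(range(1, universe_size + 1), k):
--         cand = frozenset(subset)
--         if not _extends_to_sunflower(family, cand, r):
--             family.append(cand)
--     return family
-- ===== Notes on version B (the rewrite author's own statement) =====
-- stated objective: faster
-- what changed: Per candidate, B tests only the C(n,r-1) combinations of family sets that get the new candidate appended (the family built so far is already sunflower-free, so any new sunflower must contain the candidate), and checks each selection by the element-multiplicity characterization (every element in >=2 sets must be in all) instead of recomputing the kernel and all pairwise intersections; A rescans all C(n+1,r) index combinations each time.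
import Mathlib
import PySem

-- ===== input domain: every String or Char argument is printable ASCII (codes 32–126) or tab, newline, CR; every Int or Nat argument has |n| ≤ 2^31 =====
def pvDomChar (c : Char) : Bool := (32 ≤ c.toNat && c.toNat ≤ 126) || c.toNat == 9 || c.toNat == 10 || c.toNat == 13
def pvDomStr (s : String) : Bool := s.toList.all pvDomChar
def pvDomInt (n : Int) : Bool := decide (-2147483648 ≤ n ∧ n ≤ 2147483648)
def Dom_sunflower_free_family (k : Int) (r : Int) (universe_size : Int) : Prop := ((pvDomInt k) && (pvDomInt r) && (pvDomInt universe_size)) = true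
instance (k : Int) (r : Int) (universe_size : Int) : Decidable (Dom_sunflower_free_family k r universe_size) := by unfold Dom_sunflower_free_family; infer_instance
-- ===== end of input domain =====

-- B tests only r-combinations that contain the new candidate (the family built so far is
-- already sunflower-free), checking each via the element-multiplicity characterization:
-- C(n,r-1) combinations per candidate instead of A's C(n+1,r).

-- shared helper: itertools.combinations(xs, r) in Python's lexicographic order
def combos {α : Type} (r : Nat) (xs : List α) : List (List α) :=
  match r, xs with
  | 0, _ => [[]]
  | _+1, [] => []
  | r+1, x :: xs => (combos r xs).map (fun l => x :: l) ++ combos (r+1) xs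

-- ===== PORT A =====
-- frozenset a & frozenset b (as the list of distinct elements of a lying in b)
def setInter (a b : List Int) : List Int := a.filter (fun x => b.contains x)
-- frozenset equality (set equality; Python's == / != on frozensets)
def pySetEq (a b : List Int) : Bool :=
  a.all (fun x => b.contains x) && b.all (fun x => a.contains x)

-- A's inner check on one selection of sets: kernel := ∩ all; every pair meets exactly in it.
-- (Python reads sets[0]; that line is only reached with r ≥ 1, so sets ≠ [] — headD is exact there.)
def sfCheckA (sets : List (List Int)) : Bool :=
  let kernel := (sets.drop 1).foldl setInter (sets.headD [])
  (List.range sets.length).all (fun i =>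
    (List.range' (i+1) (sets.length - (i+1))).all (fun j =>
      pySetEq (setInter (sets.getD i []) (sets.getD j [])) kernel))

def is_sunflower (family : List (List Int)) (r : Int) : Option (List Nat) :=
  if (family.length : Int) < r then none
  else (combos r.toNat (List.range family.length)).find?
    (fun idx => sfCheckA (idx.map (fun i => family.getD i [])))

def sunflower_free_family (k : Int) (r : Int) (universe_size : Int) : List (List Int) :=
  (combos k.toNat (PySem.List.pyRange 1 (universe_size + 1) 1)).foldl
    (fun family subset =>
      if is_sunflower (family ++ [subset]) r = none then family ++ [subset] else family) []

-- ===== PORT B =====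
-- sunflower ⟺ every element lying in ≥ 2 of the sets lies in all of them
def sfCheckB (sets : List (List Int)) : Bool :=
  (PySem.List.enumerate sets).all (fun p =>
    p.2.all (fun x =>
      sets.all (fun t => t.contains x) ||
      !((PySem.List.enumerate sets).any (fun q => (q.1 != p.1) && q.2.contains x))))

def extendsToSunflower (family : List (List Int)) (cand : List Int) (r : Int) : Bool :=
  (combos (r - 1).toNat family).any (fun chosen => sfCheckB (chosen ++ [cand]))

def sunflower_free_family_alt (k : Int) (r : Int) (universe_size : Int) : List (List Int) :=
  (combos k.toNat (PySem.List.pyRange 1 (universe_size + 1) 1)).foldl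
    (fun family subset =>
      if extendsToSunflower family subset r then family else family ++ [subset]) []

-- ===== PRECONDITION & SPEC =====
-- A raises outside this: k < 0 is a ValueError in combinations; r ≤ 0 raises (ValueError or
-- IndexError on sets[0]) as soon as one candidate is tested, i.e. unless k > max(universe_size, 0).
def Pre_sunflower_free_family (k : Int) (r : Int) (universe_size : Int) : Prop :=
  0 ≤ k ∧ (1 ≤ r ∨ (0 < k ∧ universe_size < k))
instance (k : Int) (r : Int) (universe_size : Int) : Decidable (Pre_sunflower_free_family k r universe_size) := by unfold Pre_sunflower_free_family; infer_instance

def pvWitness_sunflower_free_family : Int × Int × Int := (2, 3, 4)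

def Spec_sunflower_free_family (k : Int) (r : Int) (universe_size : Int) (out : List (List Int)) : Prop := out = sunflower_free_family_alt k r universe_size
instance (k : Int) (r : Int) (universe_size : Int) (out : List (List Int)) : Decidable (Spec_sunflower_free_family k r universe_size out) := by unfold Spec_sunflower_free_family; infer_instance

-- ===== CLAIM (what is proved, stated in full; the proofs are below) =====
def Claim_equal_sunflower_free_family : Prop := ∀ (k : Int) (r : Int) (universe_size : Int), Dom_sunflower_free_family k r universe_size → Pre_sunflower_free_family k r universe_size → Spec_sunflower_free_family k r universe_size (sunflower_free_family k r universe_size)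

-- ===== LEMMAS AND PROOFS =====

lemma combos_eq_nil {α : Type} {r : Nat} {xs : List α} (h : xs.length < r) : combos r xs = [] := by
  induction xs generalizing r with
  | nil => cases r with
    | zero => simp at h
    | succ r => simp [combos]
  | cons x xs ih =>
    cases r with
    | zero => simp at h
    | succ r =>
      simp [combos]
      constructor
      · cases r with
        | zero => simp at h
        | succ r => exact ih (by simp at h ⊢; omega)
      · exact ih (by simp at h ⊢; omega)

lemma mem_combos {α : Type} {l : List α} {r : Nat} {xs : List α}
    (h : l ∈ combos r xs) : l.length = r ∧ l.Sublist xs := by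
  induction xs generalizing r l with
  | nil =>
    cases r with
    | zero => simp [combos] at h; simp [h]
    | succ r => simp [combos] at h
  | cons x xs ih =>
    cases r with
    | zero => simp [combos] at h; simp [h]
    | succ r =>
      simp [combos] at h
      rcases h with ⟨l', hl', rfl⟩ | h
      · obtain ⟨h1, h2⟩ := ih hl'
        exact ⟨by simp [h1], List.Sublist.cons₂ x h2⟩
      · obtain ⟨h1, h2⟩ := ih h
        exact ⟨h1, h2.cons x⟩

lemma combos_map {α β : Type} (f : α → β) (r : Nat) (xs : List α) :
    combos r (xs.map f) = (combos r xs).map (·.map f) := by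
  induction xs generalizing r with
  | nil => cases r <;> simp [combos]
  | cons x xs ih =>
    cases r with
    | zero => simp [combos]
    | succ r => simp [combos, ih, Function.comp]

lemma any_combos_append_singleton {α : Type} (p : List α → Bool) (r : Nat) (xs : List α) (a : α) :
    (combos (r+1) (xs ++ [a])).any p =
      ((combos (r+1) xs).any p || (combos r xs).any (fun l => p (l ++ [a]))) := by
  induction xs generalizing r p with
  | nil =>
    cases r with
    | zero => simp [combos]
    | succ r => simp [combos]
  | cons x xs ih =>
    cases r with
    | zero =>
      simp only [List.cons_append, combos, List.any_append, List.any_map]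
      rw [ih]
      simp [combos, Function.comp]
      cases p [x] <;> cases p [a] <;> simp [Bool.or_comm]
    | succ r =>
      simp only [List.cons_append, combos, List.any_append, List.any_map]
      rw [ih, ih]
      simp only [Function.comp_def, List.cons_append]
      simp [Bool.or_left_comm, Bool.or_comm, Bool.or_assoc]

lemma map_range_getD {α : Type} [Inhabited α] (l : List α) (d : α) :
    (List.range l.length).map (fun i => l.getD i d) = l := by
  apply List.ext_getElem
  · simp
  · intro i h1 h2
    simp [List.getD_eq_getElem?_getD, List.getElem?_eq_getElem h2]

lemma mem_foldl_setInter (x : Int) (rest : List (List Int)) (s0 : List Int) :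
    x ∈ rest.foldl setInter s0 ↔ x ∈ s0 ∧ ∀ t ∈ rest, x ∈ t := by
  induction rest generalizing s0 with
  | nil => simp
  | cons t rest ih =>
    simp [List.foldl_cons, ih, setInter]
    tauto

lemma pySetEq_iff (a b : List Int) : pySetEq a b = true ↔ ∀ x, x ∈ a ↔ x ∈ b := by
  simp [pySetEq]
  constructor
  · rintro ⟨h1, h2⟩ x; exact ⟨h1 x, h2 x⟩
  · intro h; exact ⟨fun x hx => (h x).1 hx, fun x hx => (h x).2 hx⟩

lemma sfCheckA_iff (sets : List (List Int)) (hne : sets ≠ []) :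
    sfCheckA sets = true ↔
      ∀ i j, (hi : i < sets.length) → (hj : j < sets.length) → i < j →
        ∀ x, (x ∈ sets[i] ∧ x ∈ sets[j]) ↔ (∀ t ∈ sets, x ∈ t) := by
  obtain ⟨s0, rest, rfl⟩ := List.exists_cons_of_ne_nil hne
  have hker : ∀ x, x ∈ (List.foldl setInter s0 rest) ↔ ∀ t ∈ s0 :: rest, x ∈ t := by
    intro x
    rw [mem_foldl_setInter]
    simp
  simp only [sfCheckA, List.all_eq_true, List.mem_range, List.mem_range'_1]
  constructor
  · intro h i j hi hj hij x
    have := h i hi j ⟨by omega, by omega⟩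
    rw [pySetEq_iff] at this
    have hx := this x
    rw [List.getD_eq_getElem?_getD, List.getElem?_eq_getElem hi,
        List.getD_eq_getElem?_getD, List.getElem?_eq_getElem hj] at hx
    simp only [setInter, List.mem_filter, List.contains_iff_mem] at hx
    rw [← hker x]
    simp only [List.headD_cons, List.drop_one, List.tail_cons] at hx ⊢
    constructor
    · intro ⟨h1, h2⟩; exact hx.1 ⟨h1, by simpa using h2⟩
    · intro hmem; have := hx.2 hmem; exact ⟨this.1, by simpa using this.2⟩
  · intro h i hi j hj
    obtain ⟨hj1, hj2⟩ := hj
    rw [pySetEq_iff]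
    intro x
    have hx := h i j hi (by omega) (by omega) x
    rw [List.getD_eq_getElem?_getD, List.getElem?_eq_getElem hi,
        List.getD_eq_getElem?_getD, List.getElem?_eq_getElem (show j < (s0 :: rest).length by omega)]
    simp only [setInter, List.mem_filter, List.contains_iff_mem]
    rw [← hker x] at hx
    simp only [List.headD_cons, List.drop_one, List.tail_cons]
    constructor
    · intro ⟨h1, h2⟩; exact hx.1 ⟨h1, by simpa using h2⟩
    · intro hmem; have := hx.2 hmem; exact ⟨this.1, by simpa using this.2⟩

lemma all_enumerate {α : Type} (xs : List α) (s : Int) (f : Int × α → Bool) :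
    (PySem.List.enumerate xs s).all f = true ↔
      ∀ i, (hi : i < xs.length) → f (s + i, xs[i]) = true := by
  induction xs generalizing s with
  | nil => simp [PySem.List.enumerate_nil]
  | cons x xs ih =>
    rw [PySem.List.enumerate_cons]
    simp only [List.all_cons, Bool.and_eq_true, ih]
    constructor
    · rintro ⟨h0, h⟩ i hi
      cases i with
      | zero => simpa using h0
      | succ i =>
        have := h i (by simpa using Nat.lt_of_succ_lt_succ hi)
        simpa [add_assoc, add_comm, add_left_comm] using this
    · intro h
      refine ⟨by simpa using h 0 (by simp), fun i hi => ?_⟩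
      have := h (i + 1) (by simpa using Nat.succ_lt_succ hi)
      simpa [add_assoc, add_comm, add_left_comm] using this

lemma any_enumerate {α : Type} (xs : List α) (s : Int) (f : Int × α → Bool) :
    (PySem.List.enumerate xs s).any f = true ↔
      ∃ i, ∃ (hi : i < xs.length), f (s + i, xs[i]) = true := by
  induction xs generalizing s with
  | nil => simp [PySem.List.enumerate_nil]
  | cons x xs ih =>
    rw [PySem.List.enumerate_cons]
    simp only [List.any_cons, Bool.or_eq_true, ih]
    constructor
    · rintro (h0 | ⟨i, hi, h⟩)
      · exact ⟨0, by simp, by simpa using h0⟩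
      · exact ⟨i + 1, by simpa using Nat.succ_lt_succ hi,
          by simpa [add_assoc, add_comm, add_left_comm] using h⟩
    · rintro ⟨i, hi, h⟩
      cases i with
      | zero => exact Or.inl (by simpa using h)
      | succ i =>
        exact Or.inr ⟨i, by simpa using Nat.lt_of_succ_lt_succ hi,
          by simpa [add_assoc, add_comm, add_left_comm] using h⟩

lemma sfCheckB_iff (sets : List (List Int)) :
    sfCheckB sets = true ↔
      ∀ i, (hi : i < sets.length) → ∀ x ∈ sets[i],
        (∀ t ∈ sets, x ∈ t) ∨ (∀ j, (hj : j < sets.length) → j ≠ i → x ∉ sets[j]) := by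
  simp only [sfCheckB, all_enumerate]
  constructor
  · intro h i hi x hx
    have := h i hi
    simp only [List.all_eq_true, Bool.or_eq_true] at this
    rcases this x hx with hall | hno
    · left; intro t ht; simpa [List.contains_iff_mem] using hall t ht
    · right
      intro j hj hji hxj
      rw [Bool.not_eq_true', ← Bool.not_eq_true, any_enumerate] at hno
      exact hno ⟨j, hj, by simp [List.contains_iff_mem, hxj]; omega⟩
  · intro h i hi
    simp only [List.all_eq_true, Bool.or_eq_true]
    intro x hx
    rcases h i hi x hx with hall | hno
    · left; intro t ht; simpa [List.contains_iff_mem] using hall t ht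
    · right
      rw [Bool.not_eq_true', ← Bool.not_eq_true, any_enumerate]
      rintro ⟨j, hj, hcon⟩
      simp only [bne_iff_ne, Bool.and_eq_true, decide_eq_true_eq, List.contains_iff_mem] at hcon
      have hji : j ≠ i := by
        intro hji; apply hcon.1; omega
      exact hno j hj hji hcon.2

lemma sfCheckA_eq_sfCheckB (sets : List (List Int)) (hne : sets ≠ []) :
    sfCheckA sets = sfCheckB sets := by
  rw [Bool.eq_iff_iff, sfCheckA_iff sets hne, sfCheckB_iff sets]
  constructor
  · intro h i hi x hx
    by_cases hall : ∀ t ∈ sets, x ∈ t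
    · exact Or.inl hall
    · right
      intro j hj hji hxj
      apply hall
      rcases Nat.lt_or_ge i j with hij | hij
      · exact (h i j hi hj hij x).1 ⟨hx, hxj⟩
      · have : j < i := by omega
        exact (h j i hj hi this x).1 ⟨hxj, hx⟩
  · intro h i j hi hj hij x
    constructor
    · rintro ⟨h1, h2⟩
      rcases h i hi x h1 with hall | hno
      · exact hall
      · exact absurd h2 (hno j hj (by omega))
    · intro hall
      exact ⟨hall _ (List.getElem_mem hi), hall _ (List.getElem_mem hj)⟩

lemma any_congr_mem {α : Type} {l : List α} {p q : α → Bool}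
    (h : ∀ x ∈ l, p x = q x) : l.any p = l.any q := by
  induction l with
  | nil => rfl
  | cons x xs ih => simp only [List.any_cons, h x (by simp), ih (fun y hy => h y (by simp [hy]))]

-- one greedy step: with the current family sunflower-free, A's full scan and B's
-- candidate-restricted scan agree
lemma step_eq (r : Int) (hr : 1 ≤ r) (F : List (List Int)) (c : List Int)
    (hF : is_sunflower F r = none) :
    (is_sunflower (F ++ [c]) r = none) ↔ (extendsToSunflower F c r = false) := by
  have hR : 1 ≤ r.toNat := by omega
  have hR1 : (r - 1).toNat = r.toNat - 1 := by omega
  by_cases hg : ((F ++ [c]).length : Int) < r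
  · have hA : is_sunflower (F ++ [c]) r = none := by
      unfold is_sunflower
      rw [if_pos hg]
    have hB : extendsToSunflower F c r = false := by
      unfold extendsToSunflower
      rw [combos_eq_nil (show F.length < (r - 1).toNat by
        simp only [List.length_append, List.length_cons, List.length_nil] at hg; omega)]
      rfl
    simp [hA, hB]
  · obtain ⟨R, hRe⟩ : ∃ R, r.toNat = R + 1 := ⟨r.toNat - 1, by omega⟩
    have hlen : (F ++ [c]).length = F.length + 1 := by simp
    -- A side as an `any` over all index combinations
    have hA : (is_sunflower (F ++ [c]) r = none) ↔
        ((combos (R + 1) (List.range (F.length + 1))).any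
          (fun idx => sfCheckA (idx.map (fun i => (F ++ [c]).getD i []))) = false) := by
      rw [is_sunflower, if_neg hg, hRe, hlen, List.find?_eq_none, List.any_eq_false]
    rw [hA, List.range_succ, any_combos_append_singleton]
    -- entries of an index combination over `range F.length` stay below F.length
    have hlt : ∀ {ρ : Nat} {idx : List Nat}, idx ∈ combos ρ (List.range F.length) →
        ∀ i ∈ idx, i < F.length := by
      intro ρ idx hm i hi
      exact List.mem_range.mp ((mem_combos hm).2.subset hi)
    -- on such combinations the appended candidate is invisible
    have hmapF : ∀ {ρ : Nat} {idx : List Nat}, idx ∈ combos ρ (List.range F.length) →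
        idx.map (fun i => (F ++ [c]).getD i []) = idx.map (fun i => F.getD i []) := by
      intro ρ idx hm
      apply List.map_congr_left
      intro i hi
      have := hlt hm i hi
      simp [List.getD_eq_getElem?_getD, List.getElem?_append_left this]
    -- first disjunct: no sunflower inside F alone (the invariant)
    have h1 : (combos (R + 1) (List.range F.length)).any
        (fun idx => sfCheckA (idx.map (fun i => (F ++ [c]).getD i []))) = false := by
      rw [List.any_eq_false]
      intro idx hm
      rw [hmapF hm]
      by_cases hgF : (F.length : Int) < r
      · rw [combos_eq_nil (show (List.range F.length).length < R + 1 by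
          rw [List.length_range]; omega)] at hm
        simp at hm
      · rw [is_sunflower, if_neg hgF, hRe, List.find?_eq_none] at hF
        exact fun hc => hF idx hm hc
    rw [h1, Bool.false_or]
    -- second disjunct is exactly B's scan
    have hgetc : (F ++ [c]).getD F.length [] = c := by
      simp [List.getD_eq_getElem?_getD, List.getElem?_append_right (le_refl F.length)]
    have hcomF : combos R F =
        (combos R (List.range F.length)).map (fun l => l.map (fun i => F.getD i [])) := by
      conv_lhs => rw [← map_range_getD F []]
      exact combos_map _ R _
    unfold extendsToSunflower
    rw [hR1, hRe, Nat.add_sub_cancel, hcomF, List.any_map]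
    rw [any_congr_mem (l := combos R (List.range F.length))
      (p := fun l => sfCheckA ((l ++ [F.length]).map (fun i => (F ++ [c]).getD i [])))
      (q := (fun chosen => sfCheckB (chosen ++ [c])) ∘ fun l => l.map (fun i => F.getD i []))
      (by
        intro l hm
        simp only [Function.comp_def]
        rw [List.map_append, hmapF hm, List.map_singleton, hgetc,
            sfCheckA_eq_sfCheckB _ (by simp)])]

lemma fold_eq (r : Int) (hr : 1 ≤ r) (cs : List (List Int)) (F : List (List Int))
    (hF : is_sunflower F r = none) :
    cs.foldl (fun family subset =>
        if is_sunflower (family ++ [subset]) r = none then family ++ [subset] else family) F =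
    cs.foldl (fun family subset =>
        if extendsToSunflower family subset r then family else family ++ [subset]) F := by
  induction cs generalizing F with
  | nil => rfl
  | cons c cs ih =>
    simp only [List.foldl_cons]
    by_cases h : is_sunflower (F ++ [c]) r = none
    · rw [if_pos h, if_neg (by simp [← (step_eq r hr F c hF).mp h])]
      exact ih (F ++ [c]) h
    · rw [if_neg h, if_pos (by
        rcases Bool.eq_false_or_eq_true (extendsToSunflower F c r) with hb | hb
        · exact hb
        · exact absurd ((step_eq r hr F c hF).mpr hb) h : extendsToSunflower F c r = true)]
      exact ih F hF

-- ===== VERDICT (by name: the statement is the Claim_ definition above) =====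
theorem sunflower_free_family_spec : Claim_equal_sunflower_free_family := by
  intro k r u _hDom hPre
  unfold Spec_sunflower_free_family sunflower_free_family sunflower_free_family_alt
  rcases hPre with ⟨hk, hr | ⟨hk0, hu⟩⟩
  · exact fold_eq r hr _ [] (by simp [is_sunflower]; omega)
  · rw [combos_eq_nil (by
      rw [PySem.List.length_pyRange_one]
      omega)]
    rfl
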